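-- pv_equiv track=rewrite | github.com/hapaxx11/M1 | tools/png_to_xbm_array.py | xbm_to_pixels
-- ===== SOURCE A (Python) =====
-- def xbm_to_pixels(xbm_bytes, width, height):
--     """Convert u8g2 XBM byte array back to pixel array.
--
--     Bit SET (1) → dark pixel (0) in output (inverted polarity).
--     """
--     bytes_per_row = (width + 7) // 8
--     pixels = []
--
--     for y in range(height):
--         row = []
--         for x in range(width):
--             bx = x // 8
--             bit = x % 8
--             byte_val = xbm_bytes[y * bytes_per_row + bx]
--             # Inverted: bit set (1) → dark pixel (0)
--             row.append(0 if (byte_val >> bit) & 1 else 1)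
--         pixels.append(row)
--
--     return pixels
-- ===== SOURCE B (Python) =====
-- def xbm_to_pixels(xbm_bytes, width, height):
--     """Convert u8g2 XBM byte array back to pixel array (byte-unpacking version)."""
--     bytes_per_row = (width + 7) // 8
--     pixels = []
--     for y in range(height):
--         bits = []
--         for b in xbm_bytes[y * bytes_per_row:(y + 1) * bytes_per_row]:
--             for i in range(8):
--                 bits.append(0 if (b >> i) & 1 else 1)
--         pixels.append(bits[:width])
--     return pixels
-- ===== Notes on version B (the rewrite author's own statement) =====
-- stated objective: alternative
-- what changed: B drops A's per-pixel byte/bit index arithmetic: it slices out each row's bytes, unpacks every byte's 8 bits LSB-first into a bit list, and truncates the row to width, so the inner list indexing disappears.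
-- outside the precondition, e.g. on xbm_to_pixels([1, 2, 3], -9, 1): A returns [[]], B returns [[0, 1, 1, 1, 1, 1, 1]]
import Mathlib
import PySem

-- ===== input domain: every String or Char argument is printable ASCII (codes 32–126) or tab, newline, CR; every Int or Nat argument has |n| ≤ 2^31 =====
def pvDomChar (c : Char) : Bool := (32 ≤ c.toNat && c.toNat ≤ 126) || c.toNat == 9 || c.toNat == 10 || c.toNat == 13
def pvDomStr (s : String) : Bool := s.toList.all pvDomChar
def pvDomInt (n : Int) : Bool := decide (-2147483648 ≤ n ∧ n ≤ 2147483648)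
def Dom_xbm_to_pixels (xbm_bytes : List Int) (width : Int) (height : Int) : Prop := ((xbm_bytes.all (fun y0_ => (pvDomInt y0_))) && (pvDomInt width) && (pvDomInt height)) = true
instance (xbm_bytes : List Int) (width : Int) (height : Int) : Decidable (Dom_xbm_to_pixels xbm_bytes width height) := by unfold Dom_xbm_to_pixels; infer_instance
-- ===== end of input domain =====

-- B replaces A's per-pixel byte/bit index arithmetic by slicing out each row's bytes, unpacking
-- all 8 bits of every byte LSB-first, and truncating the row to `width` (objective: alternative).

-- ===== PORT A =====
-- Python `byte_val >> bit` is `>>>`; bit = x % 8 is nonnegative, so the `.toNat` cast is exact.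
def xbm_to_pixels (xbm_bytes : List Int) (width : Int) (height : Int) : List (List Int) :=
  let bytes_per_row := PySem.Int.floordiv (width + 7) 8
  (PySem.List.pyRange 0 height 1).foldl (fun pixels y =>
    let row := (PySem.List.pyRange 0 width 1).foldl (fun row x =>
      let bx := PySem.Int.floordiv x 8
      let bit := PySem.Int.mod x 8
      let byte_val := PySem.List.pyGetD xbm_bytes (y * bytes_per_row + bx) 0
      row ++ [if PySem.Int.band (byte_val >>> (bit.toNat : Int)) 1 ≠ 0 then 0 else 1]) []
    pixels ++ [row]) []

-- ===== PORT B =====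
-- Python `b >> i` is `>>>`; i ∈ range(8) is nonnegative, so the `.toNat` cast is exact.
def xbm_to_pixels_alt (xbm_bytes : List Int) (width : Int) (height : Int) : List (List Int) :=
  let bytes_per_row := PySem.Int.floordiv (width + 7) 8
  (PySem.List.pyRange 0 height 1).foldl (fun pixels y =>
    let bits := (PySem.List.slice xbm_bytes (some (y * bytes_per_row)) (some ((y + 1) * bytes_per_row))).foldl
      (fun bits b =>
        bits ++ (PySem.List.pyRange 0 8 1).foldl (fun acc i =>
          acc ++ [if PySem.Int.band (b >>> (i.toNat : Int)) 1 ≠ 0 then 0 else 1]) []) []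
    pixels ++ [PySem.List.slice bits none (some width)]) []

-- ===== PRECONDITION & SPEC =====
-- Pre_ restricts to the natural XBM domain (width ≥ 0, enough bytes for height rows): it excludes
-- the inputs where A's index xbm_bytes[y*bytes_per_row + bx] falls outside the list (IndexError),
-- widths ≤ -8, where A accidentally returns empty rows while B's negative slice bounds
-- count from the end — both outside the format's natural domain.
def Pre_xbm_to_pixels (xbm_bytes : List Int) (width : Int) (height : Int) : Prop :=
  height ≤ 0 ∨ (-7 ≤ width ∧ height * PySem.Int.floordiv (width + 7) 8 ≤ (xbm_bytes.length : Int))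
instance (xbm_bytes : List Int) (width : Int) (height : Int) : Decidable (Pre_xbm_to_pixels xbm_bytes width height) := by unfold Pre_xbm_to_pixels; infer_instance
def pvWitness_xbm_to_pixels : List Int × Int × Int := ([5, 255, 0, 1], 10, 2)

def Spec_xbm_to_pixels (xbm_bytes : List Int) (width : Int) (height : Int) (out : List (List Int)) : Prop := out = xbm_to_pixels_alt xbm_bytes width height
instance (xbm_bytes : List Int) (width : Int) (height : Int) (out : List (List Int)) : Decidable (Spec_xbm_to_pixels xbm_bytes width height out) := by unfold Spec_xbm_to_pixels; infer_instance

-- ===== CLAIM (what is proved, stated in full; the proofs are below) =====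
def Claim_equal_xbm_to_pixels : Prop := ∀ (xbm_bytes : List Int) (width : Int) (height : Int), Dom_xbm_to_pixels xbm_bytes width height → Pre_xbm_to_pixels xbm_bytes width height → Spec_xbm_to_pixels xbm_bytes width height (xbm_to_pixels xbm_bytes width height)

-- ===== LEMMAS AND PROOFS =====

-- the pixel value both programs compute from bit i of byte b
def pvPix (b : Int) (i : Nat) : Int := if PySem.Int.band (b >>> (i : Int)) 1 ≠ 0 then 0 else 1

-- B's inner 8-bit unpack loop is the 8 pixel values of one byte
lemma pvUnpack8 (b : Int) :
    (PySem.List.pyRange 0 8 1).foldl (fun acc i =>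
      acc ++ [if PySem.Int.band (b >>> (i.toNat : Int)) 1 ≠ 0 then (0:Int) else 1]) []
    = (List.range 8).map (pvPix b) := by
  have h : PySem.List.pyRange 0 8 1 = [0, 1, 2, 3, 4, 5, 6, 7] := by decide
  rw [h]
  rfl

-- truncating the fully unpacked bit list recovers the per-index byte/bit arithmetic
lemma pvTakeFlatMap (s : List Int) (wn : Nat) (hw : wn ≤ 8 * s.length) :
    ((s.flatMap (fun b => (List.range 8).map (pvPix b))).take wn)
    = (List.range wn).map (fun x => pvPix (s.getD (x / 8) 0) (x % 8)) := by
  induction s generalizing wn with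
  | nil =>
    simp at hw
    subst hw
    simp
  | cons b s ih =>
    have hsplit : wn = min wn 8 + (wn - 8) := by omega
    rw [List.flatMap_cons, List.take_append]
    conv_rhs => rw [hsplit, List.range_add, List.map_append]
    congr 1
    · rw [← List.map_take, List.take_range]
      apply List.map_congr_left
      intro x hx
      rw [List.mem_range] at hx
      have h1 : x / 8 = 0 := Nat.div_eq_of_lt (by omega)
      have h2 : x % 8 = x := Nat.mod_eq_of_lt (by omega)
      rw [h1, h2]
      rfl
    · rw [List.length_map, List.length_range]
      rw [ih (wn - 8) (by simp at hw ⊢; omega)]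
      rw [List.map_map]
      apply List.map_congr_left
      intro k hk
      rw [List.mem_range] at hk
      have hmin : min wn 8 = 8 := by omega
      have h1 : (8 + k) / 8 = k / 8 + 1 := by omega
      have h2 : (8 + k) % 8 = k % 8 := by omega
      simp [Function.comp, hmin, h1, h2]

-- one row: A's indexed pixels equal B's sliced-and-unpacked bits truncated to the width
lemma pvRowEq (xbm : List Int) (wn bn j : Nat) (hb : bn = (wn + 7) / 8)
    (hlen : j + bn ≤ xbm.length) :
    (List.range wn).map (fun x => pvPix (xbm.getD (j + x / 8) 0) (x % 8))
    = (((xbm.drop j).take bn).flatMap (fun b => (List.range 8).map (pvPix b))).take wn := by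
  have hslen : ((xbm.drop j).take bn).length = bn := by
    simp [List.length_take, List.length_drop]; omega
  rw [pvTakeFlatMap _ wn (by rw [hslen]; omega)]
  apply List.map_congr_left
  intro x hx
  rw [List.mem_range] at hx
  have hxd : x / 8 < bn := by omega
  congr 1
  rw [List.getD_eq_getElem _ _ (by omega), List.getD_eq_getElem _ _ (by rw [hslen]; omega)]
  simp

lemma pvMain (xbm : List Int) (w h : Int) (hw0 : 0 ≤ w)
    (hlen : h * PySem.Int.floordiv (w + 7) 8 ≤ (xbm.length : Int)) :
    xbm_to_pixels xbm w h = xbm_to_pixels_alt xbm w h := by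
  unfold xbm_to_pixels xbm_to_pixels_alt
  set wn := w.toNat with hwn
  have hw : w = (wn : Int) := by omega
  set bn := (wn + 7) / 8 with hbn
  have hbpr : PySem.Int.floordiv (w + 7) 8 = (bn : Int) := by
    rw [hw, show ((wn : Int) + 7) = ((wn + 7 : Nat) : Int) by push_cast; ring,
        show (8 : Int) = ((8 : Nat) : Int) by norm_num, PySem.Int.floordiv_natCast]
  simp only [hbpr]
  rw [PySem.List.foldl_append_singleton_eq_map, PySem.List.foldl_append_singleton_eq_map]
  simp only [List.nil_append]
  apply List.map_congr_left
  intro y hy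
  rw [PySem.List.mem_pyRange_one] at hy
  set yn := y.toNat with hyn
  have hyy : y = (yn : Int) := by omega
  have hynh : (yn : Int) < h := by omega
  have hrow : yn * bn + bn ≤ xbm.length := by
    rw [hbpr] at hlen
    have h1 : ((yn : Int) + 1) * (bn : Int) ≤ h * (bn : Int) := by
      apply mul_le_mul_of_nonneg_right (by omega) (by positivity)
    push_cast at hlen h1 ⊢
    nlinarith
  -- A's row
  rw [PySem.List.foldl_append_singleton_eq_map]
  simp only [List.nil_append]
  rw [show PySem.List.pyRange 0 w 1 = (List.range wn).map (fun (k : Nat) => (k : Int)) by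
    rw [PySem.List.pyRange_one, show (w - 0).toNat = wn by omega]
    exact List.map_congr_left (by intro k _; omega)]
  rw [List.map_map]
  -- B's row
  rw [PySem.List.foldl_append_eq_flatMap]
  simp only [List.nil_append]
  have hslice : PySem.List.slice xbm (some (y * (bn : Int))) (some ((y + 1) * (bn : Int)))
      = (xbm.drop (yn * bn)).take bn := by
    rw [hyy, show ((yn : Int) + 1) * (bn : Int) = ((yn * bn : Nat) : Int) + ((bn : Nat) : Int) by push_cast; ring,
        show (yn : Int) * (bn : Int) = ((yn * bn : Nat) : Int) by push_cast; ring,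
        PySem.List.slice_natCast_add]
  rw [hslice]
  have hflat : ((xbm.drop (yn * bn)).take bn).flatMap (fun b =>
        (PySem.List.pyRange 0 8 1).foldl (fun acc i =>
          acc ++ [if PySem.Int.band (b >>> (i.toNat : Int)) 1 ≠ 0 then (0:Int) else 1]) [])
      = ((xbm.drop (yn * bn)).take bn).flatMap (fun b => (List.range 8).map (pvPix b)) := by
    apply List.flatMap_congr
    intro b _
    exact pvUnpack8 b
  rw [hflat]
  rw [show PySem.List.slice (α := Int) ((((xbm.drop (yn * bn)).take bn).flatMap (fun b => (List.range 8).map (pvPix b)))) none (some w)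
      = (((xbm.drop (yn * bn)).take bn).flatMap (fun b => (List.range 8).map (pvPix b))).take wn by
    rw [hw, PySem.List.slice_to_natCast]]
  rw [← pvRowEq xbm wn bn (yn * bn) hbn hrow]
  apply List.map_congr_left
  intro x hx
  rw [List.mem_range] at hx
  simp only [Function.comp_apply]
  have hfd : PySem.Int.floordiv (x : Int) 8 = ((x / 8 : Nat) : Int) := by
    rw [show (8:Int) = ((8:Nat):Int) by norm_num, PySem.Int.floordiv_natCast]
  have hmd : PySem.Int.mod (x : Int) 8 = ((x % 8 : Nat) : Int) := by
    rw [show (8:Int) = ((8:Nat):Int) by norm_num, PySem.Int.mod_natCast]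
  rw [hfd, hmd]
  rw [show y * (bn : Int) + ((x / 8 : Nat) : Int) = ((yn * bn + x / 8 : Nat) : Int) by rw [hyy]; push_cast; ring]
  rw [PySem.List.pyGetD_natCast]
  simp [pvPix]
  rw [show max ((x:Int) % 8) 0 = (x:Int) % 8 by omega]

-- ===== VERDICT (by name: the statement is the Claim_ definition above) =====
theorem xbm_to_pixels_spec : Claim_equal_xbm_to_pixels := by
  intro xs w h _ hpre
  unfold Pre_xbm_to_pixels at hpre
  unfold Spec_xbm_to_pixels
  rcases hpre with hh | ⟨h1, h2⟩
  · unfold xbm_to_pixels xbm_to_pixels_alt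
    simp only [PySem.List.pyRange_one_eq_nil hh, List.foldl_nil]
  · by_cases hw0 : 0 ≤ w
    · exact pvMain xs w h hw0 h2
    · -- -7 ≤ width ≤ -1: bytes_per_row = 0, so every row is empty on both sides
      have hbpr0 : PySem.Int.floordiv (w + 7) 8 = 0 := by
        rw [PySem.Int.floordiv_eq_iff_of_pos (by norm_num)]; omega
      unfold xbm_to_pixels xbm_to_pixels_alt
      simp only [hbpr0, mul_zero]
      rw [PySem.List.foldl_append_singleton_eq_map (l := PySem.List.pyRange 0 h 1),
          PySem.List.foldl_append_singleton_eq_map (l := PySem.List.pyRange 0 h 1)]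
      simp only [List.nil_append]
      apply List.map_congr_left
      intro y _
      rw [PySem.List.pyRange_one_eq_nil (by omega : w ≤ 0)]
      simp [PySem.List.slice]
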